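-- pv_equiv track=rewrite | github.com/demisto/content | Packs/DigitalShadows/Integrations/ReliaQuestGreyMatterDRPIncidents/ReliaQuestGreyMatterDRPIncidents.py | get_comments_map
-- ===== SOURCE A (Python) =====
-- UPDATED = 'updated'
--
-- TRIAGE_ITEM_ID = 'triage-item-id'
--
-- def get_comments_map(triage_item_comments):
--     """
--     Create comments map with latest 10 comments
--     Args:
--         triage_item_comments:
--
--     Returns:
--
--     """
--     comment_map: Dict[str, list] = {}
--     for comment in triage_item_comments:
--         if comment[TRIAGE_ITEM_ID] in comment_map:
--             comment_map[comment[TRIAGE_ITEM_ID]].append(comment)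
--         else:
--             comment_map[comment[TRIAGE_ITEM_ID]] = [comment]
--     sorted_comment_map = {key: sorted(comments, key=lambda x: x[UPDATED], reverse=True) for key, comments in
--                           comment_map.items()}
--     # Keeping only latest 10 comments
--     latest_10_comments_map = {key: comments[:10] for key, comments in
--                               sorted_comment_map.items()}
--
--     return latest_10_comments_map
-- ===== SOURCE B (Python) =====
-- UPDATED = 'updated'
--
-- TRIAGE_ITEM_ID = 'triage-item-id'
--
--
-- def get_comments_map(triage_item_comments):
--     # Register keys in first-occurrence order, then one global stable sort
--     # and a capped distribution pass instead of per-group sorts + slicing.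
--     comment_map = {}
--     for comment in triage_item_comments:
--         comment_map.setdefault(comment[TRIAGE_ITEM_ID], [])
--     for comment in sorted(triage_item_comments, key=lambda x: x[UPDATED], reverse=True):
--         bucket = comment_map[comment[TRIAGE_ITEM_ID]]
--         if len(bucket) < 10:
--             bucket.append(comment)
--     return comment_map
-- ===== Notes on version B (the rewrite author's own statement) =====
-- stated objective: alternative
-- what changed: Replaces per-group sorting plus [:10] slicing of every group by one global stable reverse sort of all comments followed by a single distribution pass that appends each comment to its group only while the group holds fewer than 10 entries.
import Mathlib
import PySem

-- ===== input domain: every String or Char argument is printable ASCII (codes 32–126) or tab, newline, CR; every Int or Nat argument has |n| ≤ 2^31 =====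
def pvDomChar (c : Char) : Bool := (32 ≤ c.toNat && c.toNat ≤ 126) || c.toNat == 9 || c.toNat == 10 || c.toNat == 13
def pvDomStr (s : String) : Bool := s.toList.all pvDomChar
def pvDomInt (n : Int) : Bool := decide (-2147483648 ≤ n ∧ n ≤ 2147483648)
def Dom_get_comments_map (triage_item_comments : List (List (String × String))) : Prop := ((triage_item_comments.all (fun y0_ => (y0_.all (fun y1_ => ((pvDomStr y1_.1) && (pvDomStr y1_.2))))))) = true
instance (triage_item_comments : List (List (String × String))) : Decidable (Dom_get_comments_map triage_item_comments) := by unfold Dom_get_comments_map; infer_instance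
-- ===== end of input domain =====

-- B replaces A's per-group sorts + [:10] slices by one global stable reverse sort
-- followed by a capped distribution pass (alternative algorithm, same asymptotic cost).
-- A mutates nothing observable; the equivalence is about the return value.

-- ===== PORT A =====
-- shared helpers: comment[TRIAGE_ITEM_ID] / comment[UPDATED]; Pre_ guarantees the
-- keys are present, so the `.getD ""` default is never consulted on admitted inputs
def kId (c : List (String × String)) : String :=
  (PySem.Dict.get? (⟨c⟩ : PySem.Dict String String) "triage-item-id").getD ""

def kUpd (c : List (String × String)) : String :=
  (PySem.Dict.get? (⟨c⟩ : PySem.Dict String String) "updated").getD ""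

-- loop body of A's grouping `for comment in triage_item_comments: …`
def stepA (m : PySem.Dict String (List (List (String × String)))) (c : List (String × String)) :
    PySem.Dict String (List (List (String × String))) :=
  match PySem.Dict.get? m (kId c) with
  | some l => PySem.Dict.insert m (kId c) (l ++ [c])
  | none   => PySem.Dict.insert m (kId c) [c]

def get_comments_map (triage_item_comments : List (List (String × String))) : List (String × List (List (String × String))) :=
  let comment_map := triage_item_comments.foldl stepA ⟨[]⟩
  -- the two dict comprehensions iterate `.items()` of a dict (keys distinct), so they
  -- are exactly an entry-wise map in iteration order
  let sorted_comment_map : PySem.Dict String (List (List (String × String))) :=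
    ⟨comment_map.items.map (fun kv => (kv.1, PySem.List.sorted kv.2 kUpd true))⟩
  let latest_10_comments_map : PySem.Dict String (List (List (String × String))) :=
    ⟨sorted_comment_map.items.map (fun kv => (kv.1, kv.2.take 10))⟩
  latest_10_comments_map.items

-- ===== PORT B =====
-- loop body of B's `comment_map.setdefault(comment[TRIAGE_ITEM_ID], [])` pass
def stepB0 (m : PySem.Dict String (List (List (String × String)))) (c : List (String × String)) :
    PySem.Dict String (List (List (String × String))) :=
  if (PySem.Dict.get? m (kId c)).isSome then m else PySem.Dict.insert m (kId c) []

-- loop body of B's capped distribution pass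
def stepB (m : PySem.Dict String (List (List (String × String)))) (c : List (String × String)) :
    PySem.Dict String (List (List (String × String))) :=
  let bucket := (PySem.Dict.get? m (kId c)).getD []
  if bucket.length < 10 then PySem.Dict.insert m (kId c) (bucket ++ [c]) else m

def get_comments_map_alt (triage_item_comments : List (List (String × String))) : List (String × List (List (String × String))) :=
  let comment_map := triage_item_comments.foldl stepB0 ⟨[]⟩
  let res := (PySem.List.sorted triage_item_comments kUpd true).foldl stepB comment_map
  res.items

-- ===== PRECONDITION & SPEC =====
-- Pre_ excludes exactly the comments lacking the 'triage-item-id' or 'updated' key,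
-- on which the Python A raises KeyError.
def Pre_get_comments_map (triage_item_comments : List (List (String × String))) : Prop :=
  ∀ c ∈ triage_item_comments,
    ((PySem.Dict.get? (⟨c⟩ : PySem.Dict String String) "triage-item-id").isSome &&
     (PySem.Dict.get? (⟨c⟩ : PySem.Dict String String) "updated").isSome) = true

instance (triage_item_comments : List (List (String × String))) : Decidable (Pre_get_comments_map triage_item_comments) := by
  unfold Pre_get_comments_map; infer_instance

def pvWitness_get_comments_map : (List (List (String × String))) :=
  [[("triage-item-id", "t1"), ("updated", "2024-01-01")],
   [("triage-item-id", "t1"), ("updated", "2024-02-01")],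
   [("triage-item-id", "t2"), ("updated", "2024-01-15")]]

def Spec_get_comments_map (triage_item_comments : List (List (String × String))) (out : List (String × List (List (String × String)))) : Prop := out = get_comments_map_alt triage_item_comments
instance (triage_item_comments : List (List (String × String))) (out : List (String × List (List (String × String)))) : Decidable (Spec_get_comments_map triage_item_comments out) := by unfold Spec_get_comments_map; infer_instance

-- ===== CLAIM (what is proved, stated in full; the proofs are below) =====
def Claim_equal_get_comments_map : Prop := ∀ (triage_item_comments : List (List (String × String))), Dom_get_comments_map triage_item_comments → Pre_get_comments_map triage_item_comments → Spec_get_comments_map triage_item_comments (get_comments_map triage_item_comments)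

-- ===== LEMMAS AND PROOFS =====

-- `tbl ks f` is the association list carrying `f k` at each key of `ks`; both
-- foldl loops are shown to keep their dict in this shape.
def tbl (ks : List String) (f : String → List (List (String × String))) :
    List (String × List (List (String × String))) :=
  ks.map (fun k => (k, f k))

theorem tbl_congr {ks : List String} {f g : String → List (List (String × String))}
    (h : ∀ k ∈ ks, f k = g k) : tbl ks f = tbl ks g := by
  unfold tbl
  exact List.map_congr_left (fun k hk => by rw [h k hk])

theorem find?_tbl (k : String) (ks : List String) (f : String → List (List (String × String))) :
    (tbl ks f).find? (fun p => p.1 == k) = if k ∈ ks then some (k, f k) else none := by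
  induction ks with
  | nil => simp [tbl]
  | cons a t ih =>
    by_cases hak : a = k
    · subst hak; simp [tbl, List.find?_cons]
    · have h1 : (a == k) = false := by simp [hak]
      simp [tbl, List.find?_cons, h1, Ne.symm hak] at ih ⊢
      exact ih

theorem get?_tbl (k : String) (ks : List String) (f : String → List (List (String × String))) :
    PySem.Dict.get? (⟨tbl ks f⟩ : PySem.Dict String (List (List (String × String)))) k
      = if k ∈ ks then some (f k) else none := by
  simp only [PySem.Dict.get?, find?_tbl]
  split <;> simp

theorem contains_tbl (k : String) (ks : List String) (f : String → List (List (String × String))) :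
    PySem.Dict.contains (⟨tbl ks f⟩ : PySem.Dict String (List (List (String × String)))) k
      = decide (k ∈ ks) := by
  simp only [PySem.Dict.contains, tbl, List.any_map]
  by_cases h : k ∈ ks
  · simp only [h, decide_true]
    exact List.any_eq_true.2 ⟨k, h, by simp⟩
  · simp only [h, decide_false]
    refine List.any_eq_false.2 (fun a ha => ?_)
    simp only [Function.comp]
    have hak : a ≠ k := fun he => h (he ▸ ha)
    simp [hak]

theorem insert_tbl_mem {k : String} {ks : List String} (h : k ∈ ks)
    (f : String → List (List (String × String))) (v : List (List (String × String))) :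
    PySem.Dict.insert (⟨tbl ks f⟩ : PySem.Dict String (List (List (String × String)))) k v
      = ⟨tbl ks (fun k' => if k' = k then v else f k')⟩ := by
  simp only [PySem.Dict.insert, contains_tbl, h, decide_true, if_true]
  congr 1
  unfold tbl
  rw [List.map_map]
  refine List.map_congr_left (fun a _ => ?_)
  by_cases hak : a = k
  · subst hak; simp
  · have : (a == k) = false := by simp [hak]
    simp [Function.comp, this, hak]

theorem insert_tbl_not_mem {k : String} {ks : List String} (h : k ∉ ks)
    (f : String → List (List (String × String))) (v : List (List (String × String))) :
    PySem.Dict.insert (⟨tbl ks f⟩ : PySem.Dict String (List (List (String × String)))) k v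
      = ⟨tbl (ks ++ [k]) (fun k' => if k' = k then v else f k')⟩ := by
  simp only [PySem.Dict.insert, contains_tbl, h, decide_false, Bool.false_eq_true, if_false]
  congr 1
  unfold tbl
  rw [List.map_append]
  congr 1
  · exact (List.map_congr_left (fun a ha => by
      have hak : a ≠ k := fun he => h (he ▸ ha)
      simp [hak])).symm
  · simp

theorem filter_eq_nil_of_not_mem {k : String} {xs : List (List (String × String))}
    (h : k ∉ xs.map kId) : xs.filter (fun c => kId c == k) = [] := by
  refine List.filter_eq_nil_iff.2 (fun c hc => ?_)
  have : kId c ≠ k := fun he => h (he ▸ List.mem_map_of_mem hc)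
  simp [this]

-- grouping loop of A keeps the table shape: keys in first-occurrence order,
-- each key holding the filtered sublist
theorem A_group (xs : List (List (String × String))) :
    xs.foldl stepA ⟨[]⟩
      = ⟨tbl (PySem.Set.ofList (xs.map kId)) (fun k => xs.filter (fun c => kId c == k))⟩ := by
  induction xs using List.reverseRecOn with
  | nil => simp [tbl, PySem.Set.ofList, PySem.Set.empty]
  | append_singleton xs c ih =>
    rw [List.foldl_append, List.foldl_cons, List.foldl_nil, ih]
    have hset : PySem.Set.ofList ((xs ++ [c]).map kId)
        = PySem.Set.add (PySem.Set.ofList (xs.map kId)) (kId c) := by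
      simp [PySem.Set.ofList, List.foldl_append]
    by_cases hmem : kId c ∈ PySem.Set.ofList (xs.map kId)
    · have hadd : PySem.Set.ofList ((xs ++ [c]).map kId) = PySem.Set.ofList (xs.map kId) := by
        rw [hset, PySem.Set.add, if_pos (by simpa [List.contains_eq_mem] using hmem)]
      rw [hadd]
      simp only [stepA, get?_tbl, hmem, if_pos]
      rw [insert_tbl_mem hmem]
      congr 1
      refine tbl_congr (fun k hk => ?_)
      by_cases hkk : k = kId c
      · subst hkk; simp
      · have : (kId c == k) = false := by simp [Ne.symm hkk]
        simp [hkk, this]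
    · have hadd : PySem.Set.ofList ((xs ++ [c]).map kId)
          = PySem.Set.ofList (xs.map kId) ++ [kId c] := by
        rw [hset, PySem.Set.add, if_neg (by simpa [List.contains_eq_mem] using hmem)]
      rw [hadd]
      simp only [stepA, get?_tbl, hmem, if_false]
      rw [insert_tbl_not_mem hmem]
      congr 1
      refine tbl_congr (fun k hk => ?_)
      have hnotin : kId c ∉ xs.map kId := by
        simpa [PySem.Set.mem_ofList] using hmem
      by_cases hkk : k = kId c
      · subst hkk
        simp [filter_eq_nil_of_not_mem hnotin]
      · have : (kId c == k) = false := by simp [Ne.symm hkk]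
        simp [hkk, this]

-- B's setdefault pass builds the same key set with empty buckets
theorem B0_group (xs : List (List (String × String))) :
    xs.foldl stepB0 ⟨[]⟩
      = ⟨tbl (PySem.Set.ofList (xs.map kId)) (fun _ => [])⟩ := by
  induction xs using List.reverseRecOn with
  | nil => simp [tbl, PySem.Set.ofList, PySem.Set.empty]
  | append_singleton xs c ih =>
    rw [List.foldl_append, List.foldl_cons, List.foldl_nil, ih]
    have hset : PySem.Set.ofList ((xs ++ [c]).map kId)
        = PySem.Set.add (PySem.Set.ofList (xs.map kId)) (kId c) := by
      simp [PySem.Set.ofList, List.foldl_append]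
    by_cases hmem : kId c ∈ PySem.Set.ofList (xs.map kId)
    · have hadd : PySem.Set.ofList ((xs ++ [c]).map kId) = PySem.Set.ofList (xs.map kId) := by
        rw [hset, PySem.Set.add, if_pos (by simpa [List.contains_eq_mem] using hmem)]
      rw [hadd]
      simp [stepB0, get?_tbl, hmem]
    · have hadd : PySem.Set.ofList ((xs ++ [c]).map kId)
          = PySem.Set.ofList (xs.map kId) ++ [kId c] := by
        rw [hset, PySem.Set.add, if_neg (by simpa [List.contains_eq_mem] using hmem)]
      rw [hadd]
      simp only [stepB0, get?_tbl, hmem, Option.isSome_none, Bool.false_eq_true, if_false]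
      rw [insert_tbl_not_mem hmem]
      congr 1
      refine tbl_congr (fun k hk => by split <;> rfl)

-- the capped distribution pass computes `take 10` of each filtered sublist
theorem B_dist (K : List String) (ys : List (List (String × String)))
    (hys : ∀ c ∈ ys, kId c ∈ K) :
    ys.foldl stepB ⟨tbl K (fun _ => [])⟩
      = ⟨tbl K (fun k => (ys.filter (fun c => kId c == k)).take 10)⟩ := by
  induction ys using List.reverseRecOn with
  | nil => simp [tbl]
  | append_singleton ys c ih =>
    have hys' : ∀ c' ∈ ys, kId c' ∈ K := fun c' hc' => hys c' (by simp [hc'])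
    have hcK : kId c ∈ K := hys c (by simp)
    rw [List.foldl_append, List.foldl_cons, List.foldl_nil, ih hys']
    set L := ys.filter (fun c' => kId c' == kId c) with hL
    have hbucket : (PySem.Dict.get?
        (⟨tbl K (fun k => (ys.filter (fun c' => kId c' == k)).take 10)⟩ :
          PySem.Dict String (List (List (String × String)))) (kId c)).getD []
        = L.take 10 := by
      rw [get?_tbl, if_pos hcK, ← hL]
      rfl
    have hlen : (L.take 10).length = min L.length 10 := by
      rw [List.length_take]; omega
    by_cases hfull : L.length < 10
    · have htake : L.take 10 = L := List.take_of_length_le (by omega)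
      have hcond : (L.take 10).length < 10 := by omega
      simp only [stepB, hbucket, hcond, if_pos]
      rw [insert_tbl_mem hcK]
      congr 1
      refine tbl_congr (fun k hk => ?_)
      by_cases hkk : k = kId c
      · subst hkk
        rw [List.filter_append, ← hL]
        simp only [List.filter_cons, List.filter_nil, beq_self_eq_true, if_pos, htake]
        exact (List.take_of_length_le (by simp; omega)).symm
      · have hne : (kId c == k) = false := by simp [Ne.symm hkk]
        rw [List.filter_append]
        simp [hne, hkk]
    · have hcond : ¬ (L.take 10).length < 10 := by omega
      simp only [stepB, hbucket, hcond, if_false]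
      congr 1
      refine tbl_congr (fun k hk => ?_)
      by_cases hkk : k = kId c
      · subst hkk
        rw [List.filter_append, ← hL]
        simp only [List.filter_cons, List.filter_nil, beq_self_eq_true, if_pos]
        exact (List.take_append_of_le_length (by omega)).symm
      · have hne : (kId c == k) = false := by simp [Ne.symm hkk]
        rw [List.filter_append]
        simp [hne, hkk]

theorem insertBy_nil {α : Type} (bef : α → α → Bool) (x : α) :
    PySem.List.insertBy bef x [] = [x] := rfl

theorem insertBy_cons {α : Type} (bef : α → α → Bool) (x z : α) (zs : List α) :
    PySem.List.insertBy bef x (z :: zs)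
      = if bef x z then x :: z :: zs else z :: PySem.List.insertBy bef x zs := rfl

-- inserting into a reverse-sorted list commutes with filtering
theorem filter_insertBy (p : List (String × String) → Bool) (x : List (String × String))
    (ys : List (List (String × String)))
    (hs : ys.Pairwise (fun a b => kUpd b ≤ kUpd a)) :
    (PySem.List.insertBy (fun a b => decide (kUpd b < kUpd a)) x ys).filter p
      = if p x then PySem.List.insertBy (fun a b => decide (kUpd b < kUpd a)) x (ys.filter p)
        else ys.filter p := by
  induction ys with
  | nil => cases hpx : p x <;> simp [List.filter_cons, hpx, insertBy_nil]
  | cons y ys ih =>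
    have hs' : ys.Pairwise (fun a b => kUpd b ≤ kUpd a) := hs.tail
    have hyall : ∀ z ∈ ys, kUpd z ≤ kUpd y := fun z hz => (List.pairwise_cons.1 hs).1 z hz
    by_cases hlt : kUpd y < kUpd x
    · have : PySem.List.insertBy (fun a b => decide (kUpd b < kUpd a)) x (y :: ys)
          = x :: y :: ys := by rw [insertBy_cons, if_pos (decide_eq_true hlt)]
      rw [this]
      by_cases hpx : p x
      · have hall : ∀ z ∈ (y :: ys).filter p, decide (kUpd z < kUpd x) = true := by
          intro z hz
          rcases List.mem_cons.1 (List.mem_of_mem_filter hz) with rfl | hzm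
          · simpa using hlt
          · exact decide_eq_true (lt_of_le_of_lt (hyall z hzm) hlt)
        have hins : ∀ (zs : List (List (String × String))),
            (∀ z ∈ zs, decide (kUpd z < kUpd x) = true) →
            PySem.List.insertBy (fun a b => decide (kUpd b < kUpd a)) x zs = x :: zs := by
          intro zs hzs
          cases zs with
          | nil => rfl
          | cons z zs => rw [insertBy_cons, if_pos (hzs z (by simp))]
        rw [if_pos hpx, hins _ hall]
        simp [List.filter_cons, hpx]
      · simp [List.filter_cons, hpx]
    · have : PySem.List.insertBy (fun a b => decide (kUpd b < kUpd a)) x (y :: ys)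
          = y :: PySem.List.insertBy (fun a b => decide (kUpd b < kUpd a)) x ys := by
        rw [insertBy_cons, if_neg (by simpa using hlt)]
      rw [this]
      by_cases hpy : p y
      · rw [List.filter_cons_of_pos hpy, ih hs', List.filter_cons_of_pos hpy]
        by_cases hpx : p x
        · rw [if_pos hpx, if_pos hpx, insertBy_cons, if_neg (by simpa using hlt)]
        · rw [if_neg hpx, if_neg hpx]
      · rw [List.filter_cons_of_neg hpy, ih hs', List.filter_cons_of_neg hpy]

-- filtering commutes with Python's stable reverse sort
theorem filter_sorted (p : List (String × String) → Bool) (xs : List (List (String × String))) :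
    (PySem.List.sorted xs kUpd true).filter p
      = PySem.List.sorted (xs.filter p) kUpd true := by
  induction xs using List.reverseRecOn with
  | nil => simp [PySem.List.sorted]
  | append_singleton xs x ih =>
    have hsx : PySem.List.sorted (xs ++ [x]) kUpd true
        = PySem.List.insertBy (fun a b => decide (kUpd b < kUpd a)) x
            (PySem.List.sorted xs kUpd true) := by
      rw [PySem.List.sorted_rev_eq_foldl_insertBy, PySem.List.sorted_rev_eq_foldl_insertBy,
        List.foldl_append, List.foldl_cons, List.foldl_nil]
    rw [hsx, filter_insertBy p x _ (PySem.List.sorted_pairwise_rev xs kUpd), ih,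
      List.filter_append]
    by_cases hpx : p x
    · rw [if_pos hpx]
      simp only [List.filter_cons, hpx, if_pos, List.filter_nil]
      rw [PySem.List.sorted_rev_eq_foldl_insertBy, PySem.List.sorted_rev_eq_foldl_insertBy,
        List.foldl_append, List.foldl_cons, List.foldl_nil]
    · rw [if_neg hpx]
      simp [List.filter_cons, hpx]

-- ===== VERDICT (by name: the statement is the Claim_ definition above) =====
theorem get_comments_map_spec : Claim_equal_get_comments_map := by
  intro tics _ _
  show get_comments_map tics = get_comments_map_alt tics
  simp only [get_comments_map, get_comments_map_alt]
  rw [A_group, B0_group]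
  set K := PySem.Set.ofList (tics.map kId) with hK
  have hys : ∀ c ∈ PySem.List.sorted tics kUpd true, kId c ∈ K := by
    intro c hc
    have : c ∈ tics := (PySem.List.sorted_perm tics kUpd true).mem_iff.1 hc
    rw [hK]
    exact (PySem.Set.mem_ofList _ _).2 (List.mem_map_of_mem this)
  rw [B_dist K _ hys]
  unfold tbl
  simp only [List.map_map]
  refine List.map_congr_left (fun k _ => ?_)
  simp only [Function.comp]
  rw [filter_sorted]
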